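-- pv_equiv track=rewrite | github.com/LouieLouieZPC/hello-world | 《Python编程基础》例题练习/3.2程序流程控制语句小结/2.统计字符串内元素类型的个数.py | strnum
-- ===== SOURCE A (Python) =====
-- def strnum(element):     # 定义一个函数，
--     intCount=0
--     strCount=0
--     otherCount=0
--     for i in element:
--         if i.isdigit():
--             intCount+=1
--         elif i.isalpha():
--             strCount+=1
--         else:
--             otherCount+=1
--     return(intCount,strCount,otherCount)
-- ===== SOURCE B (Python) =====
-- def strnum(element):
--     # Divide-and-conquer: split the string in half, count each half recursively,
--     # and add the resulting (digit, alpha, other) triples componentwise.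
--     if len(element) == 0:
--         return (0, 0, 0)
--     if len(element) == 1:
--         if element.isdigit():
--             return (1, 0, 0)
--         if element.isalpha():
--             return (0, 1, 0)
--         return (0, 0, 1)
--     m = len(element) // 2
--     a = strnum(element[:m])
--     b = strnum(element[m:])
--     return (a[0] + b[0], a[1] + b[1], a[2] + b[2])
-- ===== Notes on version B (the rewrite author's own statement) =====
-- stated objective: alternative
-- what changed: Replaces A's single left-to-right branching loop with three accumulators by a divide-and-conquer recursion that splits the string in half, counts each half recursively and adds the (digit, alpha, other) triples componentwise.
import Mathlib
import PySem

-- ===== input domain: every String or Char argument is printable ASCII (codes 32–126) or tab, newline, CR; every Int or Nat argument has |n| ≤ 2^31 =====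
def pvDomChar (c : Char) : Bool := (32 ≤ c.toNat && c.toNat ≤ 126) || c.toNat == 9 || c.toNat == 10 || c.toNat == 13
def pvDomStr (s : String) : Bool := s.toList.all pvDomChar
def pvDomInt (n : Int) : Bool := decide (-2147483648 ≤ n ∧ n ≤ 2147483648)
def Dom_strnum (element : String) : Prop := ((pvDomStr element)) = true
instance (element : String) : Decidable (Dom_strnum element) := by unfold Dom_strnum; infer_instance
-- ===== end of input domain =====

-- B replaces A's single branching loop by a divide-and-conquer recursion (split in half,
-- count each half, add the triples componentwise) — objective: alternative, same cost.

-- ===== PORT A =====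
-- literal port of A: one pass, three accumulators, if/elif/else
def strnum (element : String) : Int × Int × Int :=
  element.toList.foldl
    (fun (acc : Int × Int × Int) i =>
      if PySem.Chars.isdigit i then (acc.1 + 1, acc.2.1, acc.2.2)
      else if PySem.Chars.isalpha i then (acc.1, acc.2.1 + 1, acc.2.2)
      else (acc.1, acc.2.1, acc.2.2 + 1))
    (0, 0, 0)

-- ===== PORT B =====
-- port of B's recursive helper on the character list: base cases, then split at len//2
def pvCountB : List Char → Int × Int × Int
  | [] => (0, 0, 0)
  | [c] =>
      if PySem.Chars.isdigit c then (1, 0, 0)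
      else if PySem.Chars.isalpha c then (0, 1, 0)
      else (0, 0, 1)
  | c1 :: c2 :: rest =>
      let l := c1 :: c2 :: rest
      let m := l.length / 2
      let a := pvCountB (l.take m)
      let b := pvCountB (l.drop m)
      (a.1 + b.1, a.2.1 + b.2.1, a.2.2 + b.2.2)
termination_by l => l.length
decreasing_by
  · simp; omega
  · simp; omega

def strnum_alt (element : String) : Int × Int × Int := pvCountB element.toList

-- ===== PRECONDITION & SPEC =====
def Spec_strnum (element : String) (out : Int × Int × Int) : Prop := out = strnum_alt element
instance (element : String) (out : Int × Int × Int) : Decidable (Spec_strnum element out) := by unfold Spec_strnum; infer_instance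

-- ===== CLAIM (what is proved, stated in full; the proofs are below) =====
def Claim_equal_strnum : Prop := ∀ (element : String), Dom_strnum element → Spec_strnum element (strnum element)

-- ===== LEMMAS AND PROOFS =====
-- the common characterisation: indicator sums for the three categories
def pvD (c : Char) : Int := if PySem.Chars.isdigit c then 1 else 0
def pvA (c : Char) : Int := if PySem.Chars.isalpha c then 1 else 0
def pvO (c : Char) : Int :=
  if PySem.Chars.isdigit c then 0 else if PySem.Chars.isalpha c then 0 else 1

theorem dig_not_alpha (c : Char) (hd : PySem.Chars.isdigit c = true) :
    PySem.Chars.isalpha c = false := by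
  simp [PySem.Chars.isdigit, PySem.Chars.isalpha, PySem.Chars.isupper, PySem.Chars.islower,
    Char.le_def, UInt32.le_iff_toNat_le] at hd ⊢
  omega

theorem pvCountB_sums (l : List Char) :
    pvCountB l = ((l.map pvD).sum, (l.map pvA).sum, (l.map pvO).sum) := by
  induction l using pvCountB.induct with
  | case1 => simp [pvCountB]
  | case2 c hd => simp [pvCountB, pvD, pvA, pvO, hd, dig_not_alpha c hd]
  | case3 c hd ha => simp [pvCountB, pvD, pvA, pvO, hd, ha]
  | case4 c hd ha => simp [pvCountB, pvD, pvA, pvO, hd, ha]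
  | case5 c1 c2 rest _l _m ih1 ih2 =>
      rw [pvCountB, ih1, ih2]
      simp only [Prod.mk.injEq, ← List.sum_append, ← List.map_append, List.take_append_drop]
      simp only [_l, List.map_cons, List.sum_cons]
      simp

theorem strnum_fold (l : List Char) (a b c : Int) :
    l.foldl
      (fun (acc : Int × Int × Int) i =>
        if PySem.Chars.isdigit i then (acc.1 + 1, acc.2.1, acc.2.2)
        else if PySem.Chars.isalpha i then (acc.1, acc.2.1 + 1, acc.2.2)
        else (acc.1, acc.2.1, acc.2.2 + 1)) (a, b, c) =
    (a + (l.map pvD).sum, b + (l.map pvA).sum, c + (l.map pvO).sum) := by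
  induction l generalizing a b c with
  | nil => simp
  | cons h t ih =>
    simp only [List.foldl_cons, List.map_cons, List.sum_cons]
    by_cases hd : PySem.Chars.isdigit h
    · simp [hd, dig_not_alpha h hd, ih, pvD, pvA, pvO, Prod.ext_iff]
      omega
    · by_cases ha : PySem.Chars.isalpha h
      · simp [hd, ha, ih, pvD, pvA, pvO, Prod.ext_iff]
        omega
      · simp [hd, ha, ih, pvD, pvA, pvO, Prod.ext_iff]
        omega

-- ===== VERDICT (by name: the statement is the Claim_ definition above) =====
theorem strnum_spec : Claim_equal_strnum := by
  intro element _
  unfold Spec_strnum strnum strnum_alt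
  rw [strnum_fold, pvCountB_sums]
  simp
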